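-- pv_equiv track=rewrite | github.com/miliar/Code_Jam_Webscraper | solutions_python/Problem_182/669.py | get_even_count_numbers
-- ===== SOURCE A (Python) =====
-- def get_even_count_numbers(numbers):
--     candidates = set([])
--     for num in numbers:
--         if num in candidates:
--             candidates.remove(num)
--         else:
--             candidates.add(num)
--     return sorted(list(candidates))
-- ===== SOURCE B (Python) =====
-- def get_even_count_numbers(numbers):
--     counts = {}
--     for num in numbers:
--         counts[num] = counts.get(num, 0) + 1
--     odd = [num for num, c in counts.items() if c % 2 == 1]
--     return sorted(odd)
-- ===== Notes on version B (the rewrite author's own statement) =====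
-- stated objective: simpler
-- what changed: B counts occurrences in one dict pass and then filters keys by odd count, instead of A's incremental set toggling; both end with a sort.
import Mathlib
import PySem

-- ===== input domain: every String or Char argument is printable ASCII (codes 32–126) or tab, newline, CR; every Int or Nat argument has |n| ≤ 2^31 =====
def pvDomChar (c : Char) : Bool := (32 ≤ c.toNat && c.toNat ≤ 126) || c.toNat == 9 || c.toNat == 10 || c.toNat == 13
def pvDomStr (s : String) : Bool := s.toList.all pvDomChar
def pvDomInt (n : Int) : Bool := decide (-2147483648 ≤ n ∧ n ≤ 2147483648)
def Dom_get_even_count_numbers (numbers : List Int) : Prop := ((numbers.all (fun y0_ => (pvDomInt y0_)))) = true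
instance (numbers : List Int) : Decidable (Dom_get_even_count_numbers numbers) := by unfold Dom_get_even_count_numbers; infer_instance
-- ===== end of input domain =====

-- B replaces A's incremental set-toggle with a count-then-filter-odd pass; objective: simpler.

-- ===== PORT A =====
-- 'candidates.remove(num)' is guarded by 'num in candidates', so it never raises;
-- under that guard PySem.Set.discard is exactly set.remove.
def get_even_count_numbers (numbers : List Int) : List Int :=
  let candidates : PySem.Set Int := numbers.foldl
    (fun s num => if PySem.Set.contains s num then PySem.Set.discard s num
                  else PySem.Set.add s num)
    PySem.Set.empty
  PySem.List.sorted candidates (fun x => x) false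

-- ===== PORT B =====
def get_even_count_numbers_alt (numbers : List Int) : List Int :=
  let counts : PySem.Dict Int Int := numbers.foldl
    (fun d num => d.insert num (d.getD num 0 + 1)) PySem.Dict.empty
  let odd : List Int := (counts.items.filter (fun p => PySem.Int.mod p.2 2 == 1)).map (·.1)
  PySem.List.sorted odd (fun x => x) false

-- ===== PRECONDITION & SPEC =====
def Spec_get_even_count_numbers (numbers : List Int) (out : List Int) : Prop := out = get_even_count_numbers_alt numbers
instance (numbers : List Int) (out : List Int) : Decidable (Spec_get_even_count_numbers numbers out) := by unfold Spec_get_even_count_numbers; infer_instance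

-- ===== CLAIM (what is proved, stated in full; the proofs are below) =====
def Claim_equal_get_even_count_numbers : Prop := ∀ (numbers : List Int), Dom_get_even_count_numbers numbers → Spec_get_even_count_numbers numbers (get_even_count_numbers numbers)

-- ===== LEMMAS AND PROOFS =====

-- A's toggle step, named for the proofs below.
def pvToggle (s : PySem.Set Int) (num : Int) : PySem.Set Int :=
  if PySem.Set.contains s num then PySem.Set.discard s num else PySem.Set.add s num

lemma pvToggle_nodup (s : PySem.Set Int) (h : s.Nodup) (num : Int) : (pvToggle s num).Nodup := by
  unfold pvToggle
  split
  · exact PySem.Set.nodup_discard s num h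
  · exact PySem.Set.nodup_add s num h

lemma pvFoldl_toggle_nodup (l : List Int) (s : PySem.Set Int) (h : s.Nodup) :
    (l.foldl pvToggle s).Nodup := by
  induction l generalizing s with
  | nil => exact h
  | cons a t ih => exact ih _ (pvToggle_nodup s h a)

lemma mem_pvToggle (s : PySem.Set Int) (num x : Int) :
    x ∈ pvToggle s num ↔ (if x = num then x ∉ s else x ∈ s) := by
  unfold pvToggle
  by_cases hx : x = num <;> by_cases hm : num ∈ s <;>
    simp [hx, hm, PySem.Set.mem_discard]

lemma mem_pvFoldl_toggle (l : List Int) (s : PySem.Set Int) (x : Int) :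
    x ∈ l.foldl pvToggle s ↔ Xor' (x ∈ s) (Odd (l.count x)) := by
  induction l generalizing s with
  | nil => simp [Xor']
  | cons a t ih =>
    rw [List.foldl_cons, ih]
    by_cases hx : x = a
    · subst hx
      have : (x ∈ pvToggle s x) ↔ x ∉ s := by rw [mem_pvToggle]; simp
      rw [this, List.count_cons_self, Nat.odd_add_one]
      simp only [Xor', Nat.not_odd_iff_even]
      by_cases hs : x ∈ s <;>
        [rcases Nat.even_or_odd (t.count x) with he | ho;
         rcases Nat.even_or_odd (t.count x) with he | ho] <;>
        first
        | simp [hs, he, Nat.not_odd_iff_even.mpr he]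
        | simp [hs, ho, Nat.not_even_iff_odd.mpr ho]
    · have : (x ∈ pvToggle s a) ↔ x ∈ s := by rw [mem_pvToggle]; simp [hx]
      rw [this, List.count_cons]
      simp [Ne.symm hx]

lemma counts_items (numbers : List Int) :
    (numbers.foldl (fun d num => d.insert num (d.getD num 0 + 1)) PySem.Dict.empty).items
      = (PySem.Set.ofList numbers).map (fun k => (k, (numbers.count k : Int))) := by
  rw [PySem.Dict.foldl_insert_getD_add_one_eq_counter, PySem.Dict.items_counter]

lemma odd_list_eq (numbers : List Int) :
    ((numbers.foldl (fun d num => d.insert num (d.getD num 0 + 1)) PySem.Dict.empty).items.filter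
        (fun p => PySem.Int.mod p.2 2 == 1)).map (·.1)
      = (PySem.Set.ofList numbers).filter (fun k => PySem.Int.mod (numbers.count k : Int) 2 == 1) := by
  rw [counts_items, List.filter_map, List.map_map]
  simp [Function.comp_def]

lemma mod_two_eq_one_iff_odd (n : Nat) : (PySem.Int.mod (n : Int) 2 == 1) = true ↔ Odd n := by
  rw [beq_iff_eq, PySem.Int.mod_eq_emod_of_pos (by omega)]
  constructor
  · intro h
    rcases Nat.even_or_odd n with he | ho
    · exfalso; obtain ⟨k, hk⟩ := he; subst hk; push_cast at h; omega
    · exact ho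
  · intro ⟨k, hk⟩; subst hk; push_cast; omega

-- ===== VERDICT (by name: the statement is the Claim_ definition above) =====
theorem get_even_count_numbers_spec : Claim_equal_get_even_count_numbers := by
  intro numbers _
  unfold Spec_get_even_count_numbers get_even_count_numbers get_even_count_numbers_alt
  simp only []
  rw [odd_list_eq]
  apply PySem.List.sorted_eq_sorted_of_perm _ _ _ (fun a b h => h)
  apply (List.perm_ext_iff_of_nodup _ _).mpr
  · intro x
    rw [show (fun s num => if PySem.Set.contains s num then PySem.Set.discard s num
          else PySem.Set.add s num) = pvToggle from rfl,
        mem_pvFoldl_toggle, List.mem_filter, PySem.Set.mem_ofList,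
        mod_two_eq_one_iff_odd]
    constructor
    · intro h
      rcases h with ⟨he, _⟩ | ⟨h, _⟩
      · exact absurd he (by simp [PySem.Set.empty])
      · refine ⟨List.count_pos_iff.mp (Nat.pos_of_ne_zero ?_), h⟩
        intro h0; rw [h0] at h; exact (Nat.not_odd_iff_even.mpr (by simp)) h
    · intro ⟨_, h⟩
      exact Or.inr ⟨h, by simp [PySem.Set.empty]⟩
  · exact pvFoldl_toggle_nodup numbers _ (by simp [PySem.Set.empty])
  · exact List.Nodup.filter _ (PySem.Set.nodup_ofList numbers)
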